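-- pv_equiv track=rewrite | github.com/Frantic9/MQM100Scraper | githubScraper.py | filter_number
-- ===== SOURCE A (Python) =====
-- def filter_number(input):
--     input.strip()
--     temp_string = ""
--     for x in input:
--         if not x.isalpha() and x != '\n' and x != ' ':
--             temp_string += x
--         elif x == 'k':
--             temp_string += x
--             break
--         #Edge case for forks
--         elif x == 'f':
--             break
--     return temp_string.strip()
-- ===== SOURCE B (Python) =====
-- def filter_number(input):
--     # pass 1: find the first terminator ('k' or 'f') and where it is
--     cut, term = len(input), None
--     for i, x in enumerate(input):
--         if x in 'kf':
--             cut, term = i, x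
--             break
--     # pass 2: filter the prefix before the terminator
--     result = ''.join(c for c in input[:cut]
--                      if not c.isalpha() and c != '\n' and c != ' ')
--     if term == 'k':
--         result += 'k'
--     return result.strip()
-- ===== Notes on version B (the rewrite author's own statement) =====
-- stated objective: alternative
-- what changed: Replaces the single interleaved loop with early break by two separate passes: a scan that locates the first 'k'/'f' terminator, then a filtering comprehension over the prefix (plus 'k' if that was the terminator).
import Mathlib
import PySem

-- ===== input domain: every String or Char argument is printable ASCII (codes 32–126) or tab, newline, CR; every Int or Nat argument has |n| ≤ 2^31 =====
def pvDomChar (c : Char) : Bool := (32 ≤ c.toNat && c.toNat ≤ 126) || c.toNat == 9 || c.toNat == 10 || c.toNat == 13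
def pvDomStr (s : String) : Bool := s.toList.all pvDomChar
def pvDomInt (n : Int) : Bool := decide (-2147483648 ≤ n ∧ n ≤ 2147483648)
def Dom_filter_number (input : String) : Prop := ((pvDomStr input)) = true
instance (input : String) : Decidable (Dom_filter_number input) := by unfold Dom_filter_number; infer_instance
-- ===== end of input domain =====

-- B separates boundary-finding (first 'k'/'f') from filtering into two passes instead of A's
-- one interleaved loop with an early break; objective: alternative decomposition, same cost.

-- ===== PORT A =====
-- the for-loop with break: accumulator = temp_string
def pvGoA : List Char → List Char → List Char
  | acc, [] => acc
  | acc, x :: xs =>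
    if PySem.Chars.isalpha x = false ∧ x ≠ '\n' ∧ x ≠ ' ' then pvGoA (acc ++ [x]) xs
    else if x = 'k' then acc ++ [x]
    else if x = 'f' then acc
    else pvGoA acc xs

def filter_number (input : String) : String :=
  String.ofList (PySem.Chars.strip (pvGoA [] input.toList))

-- ===== PORT B =====
-- pass 1: distance to the first terminator ('k'/'f') and which one it was
def pvScanB : List Char → Nat × Option Char
  | [] => (0, none)
  | x :: xs =>
    if x = 'k' ∨ x = 'f' then (0, some x)
    else let (c, t) := pvScanB xs; (c + 1, t)

def filter_number_alt (input : String) : String :=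
  let cs := input.toList
  let ct := pvScanB cs
  let res := (PySem.List.slice cs none (some (ct.1 : Int))).filter
      (fun c => !(PySem.Chars.isalpha c) && !(c == '\n') && !(c == ' '))
  let res' := if ct.2 = some 'k' then res ++ ['k'] else res
  String.ofList (PySem.Chars.strip res')

-- ===== PRECONDITION & SPEC =====
def Spec_filter_number (input : String) (out : String) : Prop := out = filter_number_alt input
instance (input : String) (out : String) : Decidable (Spec_filter_number input out) := by unfold Spec_filter_number; infer_instance

-- ===== CLAIM (what is proved, stated in full; the proofs are below) =====
def Claim_equal_filter_number : Prop := ∀ (input : String), Dom_filter_number input → Spec_filter_number input (filter_number input)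

-- ===== LEMMAS AND PROOFS =====

def pvBodyB (xs : List Char) : List Char :=
  (xs.take (pvScanB xs).1).filter
      (fun c => !(PySem.Chars.isalpha c) && !(c == '\n') && !(c == ' '))
    ++ (if (pvScanB xs).2 = some 'k' then ['k'] else [])

theorem pvGoA_eq (xs : List Char) : ∀ acc, pvGoA acc xs = acc ++ pvBodyB xs := by
  induction xs with
  | nil => intro acc; simp [pvGoA, pvBodyB, pvScanB]
  | cons x xs ih =>
    intro acc
    by_cases hp : PySem.Chars.isalpha x = false ∧ x ≠ '\n' ∧ x ≠ ' '
    · have hk : x ≠ 'k' := by rintro rfl; exact absurd hp.1 (by decide)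
      have hf : x ≠ 'f' := by rintro rfl; exact absurd hp.1 (by decide)
      simp only [pvGoA, if_pos hp, ih]
      simp [pvBodyB, pvScanB, hk, hf, hp.1, hp.2.1, hp.2.2]
    · by_cases hk : x = 'k'
      · subst hk
        have h1 : PySem.Chars.isalpha 'k' = true := by decide
        simp [pvGoA, pvBodyB, pvScanB, h1]
      · by_cases hf : x = 'f'
        · subst hf
          have h1 : PySem.Chars.isalpha 'f' = true := by decide
          simp [pvGoA, pvBodyB, pvScanB, h1]
        · simp only [pvGoA, if_neg hp, if_neg hk, if_neg hf, ih]
          have hskip : PySem.Chars.isalpha x = true ∨ x = '\n' ∨ x = ' ' := by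
            by_contra h
            push Not at h
            exact hp ⟨by simpa using h.1, h.2.1, h.2.2⟩
          have hpred : (!(PySem.Chars.isalpha x) && !(x == '\n') && !(x == ' ')) = false := by
            rcases hskip with h | h | h <;> simp [h]
          simp [pvBodyB, pvScanB, hk, hf, hpred]

-- ===== VERDICT (by name: the statement is the Claim_ definition above) =====
theorem filter_number_spec : Claim_equal_filter_number := by
  intro input _
  unfold Spec_filter_number filter_number filter_number_alt
  simp [pvGoA_eq, pvBodyB, PySem.List.slice_to_natCast]
  split <;> simp
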